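-- pv_equiv track=rewrite | github.com/dengguojie/vue-element-admin | auto_schedule/python/lang/cce/te_schedule/avg_pool2d_schedule.py | _find_core_factor
-- ===== SOURCE A (Python) =====
-- def _evaluate_bind_core(core_n, cherry_num, factor):
--     pizza_n = (cherry_num + factor - 1) // factor
--     round_n = (pizza_n + core_n - 1) // core_n
--     return round_n * factor
--
-- def _find_core_factor(cherry_num, core_n):
--     core_gap = cherry_num * core_n
--     factor = 1
--
--     for i in range(cherry_num, 0, -1):
--         i_gap = _evaluate_bind_core(core_n, cherry_num, i)
--         if i_gap < core_gap:
--             core_gap = i_gap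
--             factor = i
--
--     return factor
-- ===== SOURCE B (Python) =====
-- def _find_core_factor(cherry_num, core_n):
--     # Divisor-block scan: ceil(cherry_num/i) takes O(sqrt(cherry_num)) distinct
--     # values; on each block of i with the same pizza count the cost is
--     # round_n * i, which is minimized at the block's smallest i, so only that
--     # endpoint needs to be examined.
--     best_gap = cherry_num * core_n
--     factor = 1
--     hi = cherry_num
--     while hi >= 1:
--         pizza_n = (cherry_num + hi - 1) // hi
--         lo = (cherry_num - 1) // pizza_n + 1
--         round_n = (pizza_n + core_n - 1) // core_n
--         gap = round_n * lo
--         if gap < best_gap: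
--             best_gap, factor = gap, lo
--         hi = lo - 1
--     return factor
-- ===== Notes on version B (the rewrite author's own statement) =====
-- stated objective: faster
-- what changed: Replaces the O(cherry_num) descending scan over every candidate factor by a divisor-block decomposition: ceil(cherry_num/i) takes O(sqrt(cherry_num)) distinct values, the cost is round_n*i on each block, so only one block endpoint is examined per block; Pre_ excludes only core_n = 0 with cherry_num >= 1, where A raises ZeroDivisionError.
import Mathlib
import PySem

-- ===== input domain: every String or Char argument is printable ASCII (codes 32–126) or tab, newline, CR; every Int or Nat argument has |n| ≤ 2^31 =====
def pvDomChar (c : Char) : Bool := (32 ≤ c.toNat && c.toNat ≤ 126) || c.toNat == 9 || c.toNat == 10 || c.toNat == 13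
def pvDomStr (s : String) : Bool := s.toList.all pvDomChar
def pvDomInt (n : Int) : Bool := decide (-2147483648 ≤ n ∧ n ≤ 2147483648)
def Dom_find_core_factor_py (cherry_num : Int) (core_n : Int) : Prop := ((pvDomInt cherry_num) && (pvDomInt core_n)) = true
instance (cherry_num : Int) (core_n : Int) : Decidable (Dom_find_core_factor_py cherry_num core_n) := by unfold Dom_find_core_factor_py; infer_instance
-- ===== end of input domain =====

-- B replaces A's full descending scan by a divisor-block scan (one candidate per block
-- of constant pizza count); same return value everywhere Python A returns.

-- ===== PORT A =====
def evaluate_bind_core_py (core_n : Int) (cherry_num : Int) (factor : Int) : Int :=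
  let pizza_n := PySem.Int.floordiv (cherry_num + factor - 1) factor
  let round_n := PySem.Int.floordiv (pizza_n + core_n - 1) core_n
  round_n * factor

def find_core_factor_py (cherry_num : Int) (core_n : Int) : Int :=
  ((PySem.List.pyRange cherry_num 0 (-1)).foldl
    (fun (st : Int × Int) i =>
      let i_gap := evaluate_bind_core_py core_n cherry_num i
      if i_gap < st.1 then (i_gap, i) else st)
    (cherry_num * core_n, 1)).2

-- ===== PORT B =====
-- Source B's while-loop over divisor blocks; the Nat fuel only totalizes the loop
-- (hi strictly decreases each iteration, so cherry_num.toNat + 1 steps always suffice).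
def fcf_block_loop (cherry_num : Int) (core_n : Int) (fuel : Nat) (best_gap : Int) (factor : Int) (hi : Int) : Int × Int :=
  match fuel with
  | 0 => (best_gap, factor)
  | fuel + 1 =>
    if 1 ≤ hi then
      let pizza_n := PySem.Int.floordiv (cherry_num + hi - 1) hi
      let lo := PySem.Int.floordiv (cherry_num - 1) pizza_n + 1
      let round_n := PySem.Int.floordiv (pizza_n + core_n - 1) core_n
      let gap := round_n * lo
      let st : Int × Int := if gap < best_gap then (gap, lo) else (best_gap, factor)
      fcf_block_loop cherry_num core_n fuel st.1 st.2 (lo - 1)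
    else (best_gap, factor)

def find_core_factor_py_alt (cherry_num : Int) (core_n : Int) : Int :=
  (fcf_block_loop cherry_num core_n (cherry_num.toNat + 1) (cherry_num * core_n) 1 cherry_num).2

-- ===== PRECONDITION & SPEC =====
-- Pre_ excludes exactly the inputs where Python A raises ZeroDivisionError
-- (core_n = 0 with a nonempty loop, i.e. cherry_num ≥ 1); B raises there too.
def Pre_find_core_factor_py (cherry_num : Int) (core_n : Int) : Prop :=
  cherry_num ≤ 0 ∨ core_n ≠ 0
instance (cherry_num : Int) (core_n : Int) : Decidable (Pre_find_core_factor_py cherry_num core_n) := by unfold Pre_find_core_factor_py; infer_instance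
def pvWitness_find_core_factor_py : Int × Int := (12, 4)

def Spec_find_core_factor_py (cherry_num : Int) (core_n : Int) (out : Int) : Prop := out = find_core_factor_py_alt cherry_num core_n
instance (cherry_num : Int) (core_n : Int) (out : Int) : Decidable (Spec_find_core_factor_py cherry_num core_n out) := by unfold Spec_find_core_factor_py; infer_instance

-- ===== CLAIM (what is proved, stated in full; the proofs are below) =====
def Claim_equal_find_core_factor_py : Prop := ∀ (cherry_num : Int) (core_n : Int), Dom_find_core_factor_py cherry_num core_n → Pre_find_core_factor_py cherry_num core_n → Spec_find_core_factor_py cherry_num core_n (find_core_factor_py cherry_num core_n)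

-- ===== LEMMAS AND PROOFS =====

-- A's loop body, named so the fold lemmas can talk about it (defeq to the lambda in the port)
def fcfUpd (cherry_num : Int) (core_n : Int) : Int × Int → Int → Int × Int :=
  fun st i =>
    let i_gap := evaluate_bind_core_py core_n cherry_num i
    if i_gap < st.1 then (i_gap, i) else st

theorem pyRange_neg_one_append (a m b : Int) (h1 : b ≤ m) (h2 : m ≤ a) :
    PySem.List.pyRange a b (-1) = PySem.List.pyRange a m (-1) ++ PySem.List.pyRange m b (-1) := by
  rw [PySem.List.pyRange_neg_one_eq_reverse, PySem.List.pyRange_neg_one_eq_reverse,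
    PySem.List.pyRange_neg_one_eq_reverse,
    PySem.List.pyRange_one_append (b + 1) (m + 1) (a + 1) (by omega) (by omega),
    List.reverse_append]

-- A's fold over a block [lo, hi] (descending) where the gap is q*i with q > 0:
-- the last strict improvement inside the block, if any, is at lo.
theorem fcf_fold_pos (c k q : Int) (hq : 0 < q) : ∀ (n : Nat) (lo hi : Int) (st : Int × Int),
    hi = lo + (n : Int) →
    (∀ i, lo ≤ i → i ≤ hi → evaluate_bind_core_py k c i = q * i) →
    (PySem.List.pyRange hi (lo - 1) (-1)).foldl (fcfUpd c k) st
      = if q * lo < st.1 then (q * lo, lo) else st := by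
  intro n
  induction n with
  | zero =>
    intro lo hi st h hf
    have hhi : hi = lo := by omega
    subst hhi
    rw [PySem.List.pyRange_neg_one_cons (by omega), PySem.List.pyRange_neg_one_eq_nil (by omega)]
    simp only [List.foldl_cons, List.foldl_nil, fcfUpd, hf hi le_rfl le_rfl]
  | succ m ih =>
    intro lo hi st h hf
    rw [PySem.List.pyRange_neg_one_cons (by omega), List.foldl_cons]
    rw [ih lo (hi - 1) (fcfUpd c k st hi) (by omega) (fun i h1 h2 => hf i h1 (by omega))]
    have hfhi := hf hi (by omega) le_rfl
    have hab : q * lo < q * hi := mul_lt_mul_of_pos_left (by omega : lo < hi) hq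
    simp only [fcfUpd, hfhi]
    by_cases hb : q * hi < st.1
    · rw [if_pos hb, show ((q * hi, hi) : Int × Int).1 = q * hi from rfl,
        if_pos hab, if_pos (lt_trans hab hb)]
    · rw [if_neg hb]

-- the arithmetic of one divisor block: p = ceil(c/hi) ≥ 1, 1 ≤ lo ≤ hi,
-- and ceil(c/i) = p for every i in [lo, hi]
theorem fcf_block_facts (c hi : Int) (h1 : 1 ≤ hi) (h2 : hi ≤ c) :
    1 ≤ PySem.Int.floordiv (c + hi - 1) hi ∧
    1 ≤ PySem.Int.floordiv (c - 1) (PySem.Int.floordiv (c + hi - 1) hi) + 1 ∧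
    PySem.Int.floordiv (c - 1) (PySem.Int.floordiv (c + hi - 1) hi) + 1 ≤ hi ∧
    ∀ i, PySem.Int.floordiv (c - 1) (PySem.Int.floordiv (c + hi - 1) hi) + 1 ≤ i → i ≤ hi →
      PySem.Int.floordiv (c + i - 1) i = PySem.Int.floordiv (c + hi - 1) hi := by
  have hhi : (0 : Int) < hi := by omega
  set p := PySem.Int.floordiv (c + hi - 1) hi with hpdef
  have hpb : p * hi ≤ c + hi - 1 ∧ c + hi - 1 < (p + 1) * hi :=
    (PySem.Int.floordiv_eq_iff_of_pos hhi).mp hpdef.symm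
  have hp1 : 1 ≤ p := (PySem.Int.le_floordiv_iff_mul_le hhi).mpr (by rw [one_mul]; omega)
  have hp0 : (0 : Int) < p := by omega
  set L := PySem.Int.floordiv (c - 1) p with hLdef
  have hL0 : 0 ≤ L := (PySem.Int.le_floordiv_iff_mul_le hp0).mpr (by rw [zero_mul]; omega)
  have hLhi : L < hi := (PySem.Int.floordiv_lt_iff_lt_mul hp0).mpr (by nlinarith [hpb.2])
  refine ⟨hp1, by omega, by omega, ?_⟩
  intro i hi1 hi2
  have hi0 : (0 : Int) < i := by omega
  apply (PySem.Int.floordiv_eq_iff_of_pos hi0).mpr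
  constructor
  · have h3 : (p - 1) * hi ≤ c - 1 := by nlinarith [hpb.1]
    have h4 : (p - 1) * i ≤ (p - 1) * hi := mul_le_mul_of_nonneg_left hi2 (by omega)
    nlinarith
  · have h5 : L < i := by omega
    have h6 : c - 1 < i * p := (PySem.Int.floordiv_lt_iff_lt_mul hp0).mp h5
    nlinarith

-- with a negative core count the initial gap c*k is already below every candidate gap,
-- so neither scan ever updates its state
theorem fcf_gap_big (c k i : Int) (hk : k ≤ -1) (h1 : 1 ≤ i) (h2 : i ≤ c) :
    c * k < evaluate_bind_core_py k c i := by
  have hi0 : (0 : Int) < i := by omega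
  simp only [evaluate_bind_core_py]
  set p := PySem.Int.floordiv (c + i - 1) i with hpdef
  have hpb : p * i ≤ c + i - 1 ∧ c + i - 1 < (p + 1) * i :=
    (PySem.Int.floordiv_eq_iff_of_pos hi0).mp hpdef.symm
  have hp1 : 1 ≤ p := (PySem.Int.le_floordiv_iff_mul_le hi0).mpr (by rw [one_mul]; omega)
  set q := PySem.Int.floordiv (p + k - 1) k with hqdef
  have hqm := PySem.Int.floordiv_mul_add_mod (p + k - 1) k
  have hmb := PySem.Int.mod_neg_bounds (p + k - 1) (by omega : k < 0)
  -- q*k ≤ p-2 (the mod lies in (k, 0])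
  have hq_up : q * k ≤ p - 2 := by rw [hqdef]; omega
  by_cases hq0 : 0 ≤ q
  · have : 0 ≤ q * i := mul_nonneg hq0 (by omega)
    nlinarith
  · -- q ≤ -1 : q*k*i ≤ c-2 while c*k*k ≥ c, so (q*i - c*k)*(-k) > 0
    have hq1 : q ≤ -1 := by omega
    have h3 : (p - 1) * i ≤ c - 1 := by nlinarith [hpb.1]
    have e1 : q * k * i ≤ (p - 2) * i := mul_le_mul_of_nonneg_right hq_up (by omega)
    have e2 : (p - 2) * i ≤ c - 1 - i := by nlinarith [h3]
    have e3 : q * k * i ≤ c - 2 := by omega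
    have hkk : (1 : Int) ≤ k * k := by nlinarith
    have hck : c ≤ c * (k * k) := le_mul_of_one_le_right (by omega) hkk
    have key : 0 < (q * i - c * k) * (-k) := by nlinarith [e3, hck]
    by_contra hcon
    push Not at hcon
    nlinarith [key]

-- A's whole fold never updates when k ≤ -1
theorem fcf_fold_neg_const (c k : Int) (hk : k ≤ -1) : ∀ (n : Nat) (hi : Int),
    hi = (n : Int) → hi ≤ c →
    (PySem.List.pyRange hi 0 (-1)).foldl (fcfUpd c k) (c * k, 1) = (c * k, 1) := by
  intro n
  induction n with
  | zero =>
    intro hi h1 h2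
    rw [PySem.List.pyRange_neg_one_eq_nil (by omega)]
    rfl
  | succ m ih =>
    intro hi h1 h2
    rw [PySem.List.pyRange_neg_one_cons (by omega), List.foldl_cons]
    have hbig := fcf_gap_big c k hi hk (by omega) h2
    have : fcfUpd c k (c * k, 1) hi = (c * k, 1) := by
      simp only [fcfUpd]
      rw [if_neg (by omega)]
    rw [this]
    exact ih (hi - 1) (by omega) (by omega)

-- B's whole loop never updates when k ≤ -1
theorem fcf_loop_neg_const (c k : Int) (hk : k ≤ -1) : ∀ (fuel : Nat) (hi : Int), hi ≤ c →
    fcf_block_loop c k fuel (c * k) 1 hi = (c * k, 1) := by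
  intro fuel
  induction fuel with
  | zero => intro hi _; rfl
  | succ m ih =>
    intro hi h2
    by_cases hhi : 1 ≤ hi
    · simp only [fcf_block_loop, if_pos hhi]
      obtain ⟨hp1, hlo1, hlohi, hconst⟩ := fcf_block_facts c hi hhi h2
      set p := PySem.Int.floordiv (c + hi - 1) hi with hpdef
      set lo := PySem.Int.floordiv (c - 1) p + 1 with hlodef
      have hbig := fcf_gap_big c k lo hk hlo1 (by omega)
      have hgap : evaluate_bind_core_py k c lo
          = PySem.Int.floordiv (p + k - 1) k * lo := by
        simp only [evaluate_bind_core_py]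
        rw [hconst lo le_rfl hlohi]
      rw [hgap] at hbig
      rw [if_neg (by omega)]
      exact ih (lo - 1) (by omega)
    · simp only [fcf_block_loop, if_neg hhi]

-- with k ≥ 1 the block gap q*i has q ≥ 1, so B's block-endpoint candidate
-- reproduces A's fold over the block; by induction over blocks the loops agree
theorem fcf_loop_eq_pos (c k : Int) (hk : 1 ≤ k) : ∀ (fuel : Nat) (hi g fa : Int), hi ≤ c → hi ≤ (fuel : Int) →
    fcf_block_loop c k fuel g fa hi
      = (PySem.List.pyRange hi 0 (-1)).foldl (fcfUpd c k) (g, fa) := by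
  intro fuel
  induction fuel with
  | zero =>
    intro hi g fa h1 h2
    rw [PySem.List.pyRange_neg_one_eq_nil (by omega)]
    rfl
  | succ m ih =>
    intro hi g fa h1 h2
    by_cases hhi : 1 ≤ hi
    · simp only [fcf_block_loop, if_pos hhi]
      obtain ⟨hp1, hlo1, hlohi, hconst⟩ := fcf_block_facts c hi hhi h1
      set p := PySem.Int.floordiv (c + hi - 1) hi with hpdef
      set lo := PySem.Int.floordiv (c - 1) p + 1 with hlodef
      set q := PySem.Int.floordiv (p + k - 1) k with hqdef
      have hq1 : 1 ≤ q := (PySem.Int.le_floordiv_iff_mul_le (by omega)).mpr (by rw [one_mul]; omega)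
      have hf : ∀ i, lo ≤ i → i ≤ hi → evaluate_bind_core_py k c i = q * i := by
        intro i ha hb
        simp only [evaluate_bind_core_py]
        rw [hconst i ha hb]
      rw [pyRange_neg_one_append hi (lo - 1) 0 (by omega) (by omega), List.foldl_append,
        fcf_fold_pos c k q (by omega) (hi - lo).toNat lo hi (g, fa) (by omega) hf]
      by_cases hv : q * lo < g
      · rw [if_pos hv]
        exact ih (lo - 1) (q * lo) lo (by omega) (by omega)
      · rw [if_neg hv]
        exact ih (lo - 1) g fa (by omega) (by omega)
    · rw [PySem.List.pyRange_neg_one_eq_nil (by omega)]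
      simp only [fcf_block_loop, if_neg hhi, List.foldl_nil]

-- ===== VERDICT (by name: the statement is the Claim_ definition above) =====
theorem find_core_factor_py_spec : Claim_equal_find_core_factor_py := by
  intro c k _ hpre
  show find_core_factor_py c k = find_core_factor_py_alt c k
  show ((PySem.List.pyRange c 0 (-1)).foldl (fcfUpd c k) (c * k, 1)).2
    = (fcf_block_loop c k (c.toNat + 1) (c * k) 1 c).2
  by_cases hc : c ≤ 0
  · rw [PySem.List.pyRange_neg_one_eq_nil (by omega)]
    simp only [fcf_block_loop, if_neg (by omega : ¬ (1 : Int) ≤ c), List.foldl_nil]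
  · rcases hpre with hc0 | hk0
    · omega
    · rcases lt_or_gt_of_ne hk0 with hk | hk
      · rw [fcf_fold_neg_const c k (by omega) c.toNat c (by omega) le_rfl,
          fcf_loop_neg_const c k (by omega) (c.toNat + 1) c le_rfl]
      · rw [fcf_loop_eq_pos c k (by omega) (c.toNat + 1) c (c * k) 1 le_rfl (by omega)]
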